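-- pv_equiv track=rewrite | github.com/eolandro/PLFLAGODEC2025 | Tema2/22590042_21590295/ExamenUnidad2.py | buscarSiguienteNodo
-- ===== SOURCE A (Python) =====
-- def buscarSiguienteNodo(aristas, inicio):
--     match aristas:
--         case []:
--             return
--         case [[p, n], *resto]:
--             if p == inicio:
--                 return n
--             return buscarSiguienteNodo(resto, inicio)
-- ===== SOURCE B (Python) =====
-- def buscarSiguienteNodo(aristas, inicio):
--     i = 0
--     n = len(aristas)
--     while i < n:
--         arista = aristas[i]
--         if len(arista) == 2:
--             if arista[0] == inicio:
--                 return arista[1]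
--             i += 1
--         else:
--             return None
--     return None
-- ===== Notes on version B (the rewrite author's own statement) =====
-- stated objective: alternative
-- what changed: Replaces A's structural recursion with pattern-matching destructuring by a flat index-based while loop that checks each edge's length and indexes into it, returning early on a match or a malformed edge.
import Mathlib
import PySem

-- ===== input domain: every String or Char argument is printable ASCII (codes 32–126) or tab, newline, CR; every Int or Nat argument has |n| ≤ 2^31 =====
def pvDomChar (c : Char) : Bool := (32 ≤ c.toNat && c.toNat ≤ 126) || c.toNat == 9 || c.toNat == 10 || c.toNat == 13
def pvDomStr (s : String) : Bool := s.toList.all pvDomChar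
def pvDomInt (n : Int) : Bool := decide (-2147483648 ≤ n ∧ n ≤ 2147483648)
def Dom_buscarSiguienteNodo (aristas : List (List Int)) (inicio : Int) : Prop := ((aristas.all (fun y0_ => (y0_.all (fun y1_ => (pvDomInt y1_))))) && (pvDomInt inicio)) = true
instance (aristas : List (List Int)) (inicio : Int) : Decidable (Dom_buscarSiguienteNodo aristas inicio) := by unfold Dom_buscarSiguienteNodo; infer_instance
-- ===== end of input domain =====

-- B replaces A's structural recursion with an index-based while-loop scan (alternative decomposition, same O(n) cost).


-- ===== PORT A =====
-- A: match aristas: [] → None; [[p,n],*resto] → if p == inicio then n else recurse; fall-through (head not length 2) → None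
def buscarSiguienteNodo (aristas : List (List Int)) (inicio : Int) : Option Int :=
  match aristas with
  | [] => none
  | ([p, n] :: resto) => if p == inicio then some n else buscarSiguienteNodo resto inicio
  | _ => none

-- ===== PORT B =====
-- B: index-based while loop; aristas[i] indexed with pyGet? 0 / pyGet? 1 after a length check
def buscarSiguienteNodoGo (aristas : List (List Int)) (inicio : Int) (i : Nat) : Option Int :=
  if h : i < aristas.length then
    if aristas[i].length = 2 then
      if PySem.List.pyGet? aristas[i] 0 = some inicio then PySem.List.pyGet? aristas[i] 1
      else buscarSiguienteNodoGo aristas inicio (i + 1)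
    else none
  else none
termination_by aristas.length - i

def buscarSiguienteNodo_alt (aristas : List (List Int)) (inicio : Int) : Option Int :=
  buscarSiguienteNodoGo aristas inicio 0

-- ===== PRECONDITION & SPEC =====
def Spec_buscarSiguienteNodo (aristas : List (List Int)) (inicio : Int) (out : Option Int) : Prop := out = buscarSiguienteNodo_alt aristas inicio
instance (aristas : List (List Int)) (inicio : Int) (out : Option Int) : Decidable (Spec_buscarSiguienteNodo aristas inicio out) := by unfold Spec_buscarSiguienteNodo; infer_instance

-- ===== CLAIM (what is proved, stated in full; the proofs are below) =====
def Claim_equal_buscarSiguienteNodo : Prop := ∀ (aristas : List (List Int)) (inicio : Int), Dom_buscarSiguienteNodo aristas inicio → Spec_buscarSiguienteNodo aristas inicio (buscarSiguienteNodo aristas inicio)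

-- ===== LEMMAS AND PROOFS =====
theorem buscarSiguienteNodoGo_eq_drop (aristas : List (List Int)) (inicio : Int) (i : Nat) :
    buscarSiguienteNodoGo aristas inicio i = buscarSiguienteNodo (aristas.drop i) inicio := by
  fun_induction buscarSiguienteNodoGo aristas inicio i with
  | case1 i h hlen hmatch =>
    rw [List.drop_eq_getElem_cons h]
    match harista : aristas[i] with
    | [p, n] =>
      simp only [harista] at hmatch
      simp [PySem.List.pyGet?, PySem.List.pyIdx?] at hmatch
      simp [buscarSiguienteNodo, hmatch, PySem.List.pyGet?, PySem.List.pyIdx?, harista]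
    | [] => simp [harista] at hlen
    | [_] => simp [harista] at hlen
    | (_ :: _ :: _ :: _) => simp [harista] at hlen
  | case2 i h hlen hmatch ih =>
    rw [List.drop_eq_getElem_cons h]
    match harista : aristas[i] with
    | [p, n] =>
      simp only [harista] at hmatch
      simp [PySem.List.pyGet?, PySem.List.pyIdx?] at hmatch
      simp [buscarSiguienteNodo, hmatch, harista, ih]
    | [] => simp [harista] at hlen
    | [_] => simp [harista] at hlen
    | (_ :: _ :: _ :: _) => simp [harista] at hlen
  | case3 i h hlen =>
    rw [List.drop_eq_getElem_cons h]
    match harista : aristas[i] with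
    | [p, n] => simp [harista] at hlen
    | [] => simp [buscarSiguienteNodo, harista]
    | [_] => simp [buscarSiguienteNodo, harista]
    | (_ :: _ :: _ :: _) => simp [buscarSiguienteNodo, harista]
  | case4 i h =>
    rw [List.drop_eq_nil_of_le (by omega)]
    simp [buscarSiguienteNodo]

-- ===== VERDICT (by name: the statement is the Claim_ definition above) =====
theorem buscarSiguienteNodo_spec : Claim_equal_buscarSiguienteNodo := by
  intro aristas inicio _
  unfold Spec_buscarSiguienteNodo buscarSiguienteNodo_alt
  rw [buscarSiguienteNodoGo_eq_drop]
  simp
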